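-- pv_equiv track=rewrite | github.com/SYusupov/AmoebaTOP_createSchedule | createIdlingSchedule_functions.py | get_collision
-- ===== SOURCE A (Python) =====
-- from itertools import combinations
--
-- def get_collision(vehicleSchedules):
--     # finding collisions for vehicles with delivery requests
--     vehicle_combs = list(combinations([k for k in vehicleSchedules], 2))
--     collisions = []
--     for comb in vehicle_combs:
--         collisions.append(None)
--         min_len = min(len(vehicleSchedules[comb[0]]), len(vehicleSchedules[comb[1]]))
--         for step in range(1, min_len):
--             if vehicleSchedules[comb[0]][step] == vehicleSchedules[comb[1]][step]:
--                 collisions[-1] = step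
--                 break
--     return collisions, vehicle_combs
-- ===== SOURCE B (Python) =====
-- def _pairs(xs):
--     # all ordered pairs (earlier element, later element), lexicographic by position
--     if not xs:
--         return []
--     head, tail = xs[0], xs[1:]
--     return [(head, y) for y in tail] + _pairs(tail)
--
--
-- def get_collision(vehicleSchedules):
--     # per-step bucketing: group vehicles by position at each step and only
--     # pair up vehicles sharing a bucket, recording the earliest step per pair
--     items = list(vehicleSchedules.items())
--     keys = [k for k, _ in items]
--     combs = _pairs(keys)
--     maxlen = max((len(s) for _, s in items), default=0)
--     first = {}
--     for step in range(1, maxlen):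
--         buckets = {}
--         for k, sched in items:
--             if step < len(sched):
--                 buckets.setdefault(sched[step], []).append(k)
--         for group in buckets.values():
--             for p in _pairs(group):
--                 first.setdefault(p, step)
--     collisions = [first.get(p) for p in combs]
--     return collisions, combs
-- ===== Notes on version B (the rewrite author's own statement) =====
-- stated objective: alternative
-- what changed: Inverts the loop nest: instead of scanning all steps for every vehicle pair, B walks steps once, buckets vehicles by their position at that step in a dict, and setdefault-records the current step for each same-bucket pair, so pairs are compared only when they actually share a position.
import Mathlib
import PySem

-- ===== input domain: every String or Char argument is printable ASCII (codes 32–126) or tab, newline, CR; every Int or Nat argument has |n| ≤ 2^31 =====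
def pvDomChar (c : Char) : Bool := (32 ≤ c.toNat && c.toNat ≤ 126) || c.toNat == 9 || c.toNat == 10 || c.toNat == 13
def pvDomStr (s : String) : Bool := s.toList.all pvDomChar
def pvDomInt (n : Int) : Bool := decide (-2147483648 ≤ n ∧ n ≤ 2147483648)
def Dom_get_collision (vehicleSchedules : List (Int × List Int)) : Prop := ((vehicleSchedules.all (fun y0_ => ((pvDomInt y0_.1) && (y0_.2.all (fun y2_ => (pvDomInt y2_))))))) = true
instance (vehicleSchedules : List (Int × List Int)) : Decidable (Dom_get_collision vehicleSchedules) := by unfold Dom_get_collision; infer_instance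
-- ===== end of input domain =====

-- B replaces A's per-pair scan over all steps by per-step bucketing of vehicles by
-- position (only same-bucket pairs are paired up, earliest step recorded first).

-- ===== PORT A =====
-- itertools.combinations(keys, 2): all pairs (earlier, later) in lexicographic order
def pyCombs2 {α : Type} : List α → List (α × α)
  | [] => []
  | x :: rest => rest.map (fun y => (x, y)) ++ pyCombs2 rest

-- the inner 'for step in range(1, min_len): … break' loop (first matching step, else None)
def aFindStep (s1 s2 : List Int) : List Int → Option Int
  | [] => none
  | s :: rest =>
      if PySem.List.pyGetD s1 s 0 == PySem.List.pyGetD s2 s 0 then some s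
      else aFindStep s1 s2 rest

def get_collision (vehicleSchedules : List (Int × List Int)) : List (Option Int) × (List (Int × Int)) :=
  let d : PySem.Dict Int (List Int) := PySem.Dict.mk vehicleSchedules
  let vehicle_combs := pyCombs2 d.keys
  let collisions := vehicle_combs.foldl (fun acc comb =>
    let sa := d.getD comb.1 []
    let sb := d.getD comb.2 []
    let min_len := min (PySem.List.len sa) (PySem.List.len sb)
    acc ++ [aFindStep sa sb (PySem.List.pyRange 1 min_len)]) []
  (collisions, vehicle_combs)

-- ===== PORT B =====
-- Source B's _pairs helper
def bPairs {α : Type} : List α → List (α × α)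
  | [] => []
  | x :: rest => rest.map (fun y => (x, y)) ++ bPairs rest

-- the 'buckets' dict built for one step: position ↦ keys of vehicles at that position
def bBuckets (step : Int) (items : List (Int × List Int)) : PySem.Dict Int (List Int) :=
  items.foldl (fun b kv =>
    if step < PySem.List.len kv.2 then
      b.modify (PySem.List.pyGetD kv.2 step 0) [] (fun g => g ++ [kv.1])
    else b) PySem.Dict.empty

-- the body of 'for step in range(1, maxlen)': setdefault every same-bucket pair to step
def bStep (items : List (Int × List Int)) (first : PySem.Dict (Int × Int) Int) (step : Int) :
    PySem.Dict (Int × Int) Int :=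
  (bBuckets step items).values.foldl (fun first group =>
    (bPairs group).foldl (fun first p => first.setdefault p step) first) first

def get_collision_alt (vehicleSchedules : List (Int × List Int)) : List (Option Int) × (List (Int × Int)) :=
  let items := vehicleSchedules
  let keys := items.map (fun kv => kv.1)
  let combs := bPairs keys
  -- max((len(s) for _, s in items), default=0): all lengths are ≥ 0, so foldl max 0 is exact
  let maxlen := items.foldl (fun m kv => max m (PySem.List.len kv.2)) 0
  let first := (PySem.List.pyRange 1 maxlen).foldl (bStep items) PySem.Dict.empty
  (combs.map (fun p => first.get? p), combs)

-- ===== PRECONDITION & SPEC =====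
-- Pre_ excludes lists with duplicate first components: those do not represent a Python
-- dict (dict keys are unique), so A's key-indexed reading of them is not defined.
def Pre_get_collision (vehicleSchedules : List (Int × List Int)) : Prop :=
  (vehicleSchedules.map (fun kv => kv.1)).Nodup
instance (vehicleSchedules : List (Int × List Int)) : Decidable (Pre_get_collision vehicleSchedules) := by
  unfold Pre_get_collision; infer_instance

def pvWitness_get_collision : (List (Int × List Int)) := [(0, [0, 1]), (1, [2, 1])]

def Spec_get_collision (vehicleSchedules : List (Int × List Int)) (out : List (Option Int) × (List (Int × Int))) : Prop := out = get_collision_alt vehicleSchedules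
instance (vehicleSchedules : List (Int × List Int)) (out : List (Option Int) × (List (Int × Int))) : Decidable (Spec_get_collision vehicleSchedules out) := by unfold Spec_get_collision; infer_instance

-- ===== CLAIM (what is proved, stated in full; the proofs are below) =====
def Claim_equal_get_collision : Prop := ∀ (vehicleSchedules : List (Int × List Int)), Dom_get_collision vehicleSchedules → Pre_get_collision vehicleSchedules → Spec_get_collision vehicleSchedules (get_collision vehicleSchedules)

-- ===== LEMMAS AND PROOFS =====

-- does the pair (kv1, kv2) collide at this step?
def collideB (step : Int) (kv1 kv2 : Int × List Int) : Bool :=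
  decide (step < PySem.List.len kv1.2) && decide (step < PySem.List.len kv2.2) &&
    (PySem.List.pyGetD kv1.2 step 0 == PySem.List.pyGetD kv2.2 step 0)

-- what one bucket of bBuckets holds
def bucketSpec (step : Int) (items : List (Int × List Int)) (v : Int) : List Int :=
  ((items.filter (fun kv => decide (step < PySem.List.len kv.2))).filter
      (fun kv => PySem.List.pyGetD kv.2 step 0 == v)).map (fun kv => kv.1)

lemma bPairs_eq {α : Type} (xs : List α) : bPairs xs = pyCombs2 xs := by
  induction xs with
  | nil => rfl
  | cons x rest ih => simp [bPairs, pyCombs2, ih]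

lemma pyCombs2_map {α β : Type} (f : α → β) (l : List α) :
    pyCombs2 (l.map f) = (pyCombs2 l).map (fun p => (f p.1, f p.2)) := by
  induction l with
  | nil => rfl
  | cons x rest ih => simp [pyCombs2, ih, List.map_map, Function.comp]

lemma mem_pyCombs2_of_sublist {α : Type} {a b : α} {l : List α}
    (h : [a, b].Sublist l) : (a, b) ∈ pyCombs2 l := by
  induction l with
  | nil => simp at h
  | cons x rest ih =>
    cases h with
    | cons _ h' =>
      exact List.mem_append_right _ (ih h')
    | cons₂ _ h' =>
      exact List.mem_append_left _ (List.mem_map.mpr ⟨b, List.singleton_sublist.mp h', rfl⟩)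

lemma sublist_of_mem_pyCombs2 {α : Type} {a b : α} {l : List α}
    (h : (a, b) ∈ pyCombs2 l) : [a, b].Sublist l := by
  induction l with
  | nil => simp [pyCombs2] at h
  | cons x rest ih =>
    simp only [pyCombs2, List.mem_append, List.mem_map] at h
    rcases h with ⟨y, hy, hab⟩ | h
    · cases hab; exact (List.singleton_sublist.mpr hy).cons₂ _
    · exact (ih h).cons _

lemma get?_foldl_setdefault (ps : List (Int × Int)) (v : Int) (p : Int × Int) :
    ∀ (d : PySem.Dict (Int × Int) Int),
    (ps.foldl (fun d q => d.setdefault q v) d).get? p =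
      if p ∈ ps then some ((d.get? p).getD v) else d.get? p := by
  induction ps with
  | nil => intro d; simp
  | cons q rest ih =>
    intro d
    rw [List.foldl_cons, ih]
    by_cases hq : p = q
    · subst hq
      by_cases hr : p ∈ rest <;>
        simp [PySem.Dict.get?_setdefault_self, hr]
    · rw [PySem.Dict.get?_setdefault_of_ne _ _ hq]
      simp [List.mem_cons, hq]

lemma foldl_if_filter {α β : Type} (cp : α → Prop) [DecidablePred cp] (F : β → α → β) :
    ∀ (l : List α) (b : β),
    l.foldl (fun b kv => if cp kv then F b kv else b) b =
      (l.filter (fun kv => decide (cp kv))).foldl F b := by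
  intro l
  induction l with
  | nil => intro b; simp
  | cons x xs ih =>
    intro b
    by_cases hx : cp x <;> simp [hx, ih]

lemma bBuckets_getD (step : Int) (items : List (Int × List Int)) (v : Int) :
    (bBuckets step items).getD v [] = bucketSpec step items v := by
  unfold bBuckets
  rw [foldl_if_filter]
  have h := PySem.Dict.getD_foldl_modify_append
      ((items.filter (fun kv => decide (step < PySem.List.len kv.2))).map
        (fun kv => (PySem.List.pyGetD kv.2 step 0, kv.1)))
      (PySem.Dict.empty) v
  rw [List.foldl_map] at h
  exact h.trans (by
    simp [bucketSpec, List.filter_map, List.map_map, Function.comp, PySem.Dict.getD_empty])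

set_option maxHeartbeats 1000000 in
lemma bBuckets_keys_nodup (step : Int) (items : List (Int × List Int)) :
    (bBuckets step items).keys.Nodup := by
  unfold bBuckets
  rw [foldl_if_filter]
  exact PySem.Dict.nodup_keys_foldl_modify_key
    (items.filter (fun kv => decide (step < PySem.List.len kv.2)))
    (fun kv => PySem.List.pyGetD kv.2 step 0) []
    (fun _ kv => fun g => g ++ [kv.1]) PySem.Dict.empty
    (by simp)

lemma mem_keys_of_getD_ne (d : PySem.Dict Int (List Int)) (v : Int)
    (h : d.getD v [] ≠ []) : v ∈ d.keys := by
  by_contra hv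
  have hc : d.contains v = false := by
    rw [PySem.Dict.contains_eq_decide_mem_keys]; simp [hv]
  exact h (PySem.Dict.getD_of_not_contains _ _ hc)

lemma mem_flat_iff (step : Int) (items : List (Int × List Int))
    (hkeys : (items.map (fun kv => kv.1)).Nodup) (kv1 kv2 : Int × List Int)
    (h12 : [kv1, kv2].Sublist items) :
    ((kv1.1, kv2.1) ∈ (bBuckets step items).values.flatMap bPairs) ↔
      collideB step kv1 kv2 = true := by
  constructor
  · intro hmem
    rcases List.mem_flatMap.mp hmem with ⟨g, hg, hpg⟩
    rw [PySem.Dict.values_eq_map_keys _ (bBuckets_keys_nodup step items) []] at hg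
    rcases List.mem_map.mp hg with ⟨v, hv, rfl⟩
    rw [bPairs_eq] at hpg
    have hsub := sublist_of_mem_pyCombs2 hpg
    have h1 : kv1.1 ∈ (bBuckets step items).getD v [] := hsub.subset (by simp)
    have h2 : kv2.1 ∈ (bBuckets step items).getD v [] := hsub.subset (by simp)
    rw [bBuckets_getD] at h1 h2
    unfold bucketSpec at h1 h2
    rcases List.mem_map.mp h1 with ⟨kv1', hkv1', hfst1⟩
    rcases List.mem_map.mp h2 with ⟨kv2', hkv2', hfst2⟩
    rw [List.mem_filter] at hkv1' hkv2'
    obtain ⟨hkv1'', hv1⟩ := hkv1'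
    obtain ⟨hkv2'', hv2⟩ := hkv2'
    rw [List.mem_filter] at hkv1'' hkv2''
    obtain ⟨hm1, hl1⟩ := hkv1''
    obtain ⟨hm2, hl2⟩ := hkv2''
    have e1 : kv1' = kv1 :=
      List.inj_on_of_nodup_map hkeys hm1 (h12.subset (by simp)) (by rw [hfst1])
    have e2 : kv2' = kv2 :=
      List.inj_on_of_nodup_map hkeys hm2 (h12.subset (by simp)) (by rw [hfst2])
    subst e1; subst e2
    simp only [decide_eq_true_eq] at hl1 hl2
    simp only [beq_iff_eq] at hv1 hv2
    rw [PySem.List.len_eq] at hl1 hl2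
    simp [collideB, PySem.List.len_eq, hv1, hv2, hl1, hl2]
  · intro hcol
    simp only [collideB, Bool.and_eq_true, decide_eq_true_eq, beq_iff_eq] at hcol
    obtain ⟨⟨hl1, hl2⟩, heq⟩ := hcol
    have hl1' := hl1
    have hl2' := hl2
    rw [PySem.List.len_eq] at hl1' hl2'
    have hsubb : [kv1.1, kv2.1].Sublist (bucketSpec step items (PySem.List.pyGetD kv1.2 step 0)) := by
      unfold bucketSpec
      have hf : (([kv1, kv2].filter (fun kv => decide (step < PySem.List.len kv.2))).filter
          (fun kv => PySem.List.pyGetD kv.2 step 0 == PySem.List.pyGetD kv1.2 step 0)) = [kv1, kv2] := by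
        simp [PySem.List.len_eq, hl1', hl2', heq]
      have hs := (((h12.filter (fun kv => decide (step < PySem.List.len kv.2))).filter
          (fun kv => PySem.List.pyGetD kv.2 step 0 == PySem.List.pyGetD kv1.2 step 0)).map
          (fun kv => kv.1))
      rw [hf] at hs
      exact hs
    have h1 : kv1.1 ∈ bucketSpec step items (PySem.List.pyGetD kv1.2 step 0) :=
      hsubb.subset (by simp)
    have hne : (bBuckets step items).getD (PySem.List.pyGetD kv1.2 step 0) [] ≠ [] := by
      rw [bBuckets_getD]
      exact List.ne_nil_of_mem h1
    have hvk := mem_keys_of_getD_ne _ _ hne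
    apply List.mem_flatMap.mpr
    refine ⟨(bBuckets step items).getD (PySem.List.pyGetD kv1.2 step 0) [], ?_, ?_⟩
    · rw [PySem.Dict.values_eq_map_keys _ (bBuckets_keys_nodup step items) []]
      exact List.mem_map.mpr ⟨_, hvk, rfl⟩
    · rw [bPairs_eq, bBuckets_getD]
      exact mem_pyCombs2_of_sublist hsubb

lemma bStep_get? (items : List (Int × List Int))
    (hkeys : (items.map (fun kv => kv.1)).Nodup) (first : PySem.Dict (Int × Int) Int)
    (step : Int) (kv1 kv2 : Int × List Int) (h12 : [kv1, kv2].Sublist items) :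
    (bStep items first step).get? (kv1.1, kv2.1) =
      if collideB step kv1 kv2 = true then some ((first.get? (kv1.1, kv2.1)).getD step)
      else first.get? (kv1.1, kv2.1) := by
  unfold bStep
  rw [← List.foldl_flatMap, get?_foldl_setdefault]
  by_cases hcol : collideB step kv1 kv2 = true
  · rw [if_pos ((mem_flat_iff step items hkeys kv1 kv2 h12).mpr hcol), if_pos hcol]
  · rw [if_neg (fun hm => hcol ((mem_flat_iff step items hkeys kv1 kv2 h12).mp hm)), if_neg hcol]

lemma foldl_bStep (items : List (Int × List Int))
    (hkeys : (items.map (fun kv => kv.1)).Nodup) (kv1 kv2 : Int × List Int)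
    (h12 : [kv1, kv2].Sublist items) :
    ∀ (steps : List Int) (d : PySem.Dict (Int × Int) Int),
    (steps.foldl (bStep items) d).get? (kv1.1, kv2.1) =
      (d.get? (kv1.1, kv2.1)).or (steps.find? (fun s => collideB s kv1 kv2)) := by
  intro steps
  induction steps with
  | nil => intro d; simp
  | cons s rest ih =>
    intro d
    rw [List.foldl_cons, ih, bStep_get? items hkeys _ s kv1 kv2 h12]
    by_cases hcol : collideB s kv1 kv2 = true
    · rw [if_pos hcol]
      have hfind : List.find? (fun t => collideB t kv1 kv2) (s :: rest) = some s := by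
        simp [List.find?, hcol]
      rw [hfind]
      cases hd : d.get? (kv1.1, kv2.1) <;> rfl
    · rw [if_neg hcol]
      simp [List.find?, hcol]

lemma aFindStep_eq (s1 s2 : List Int) :
    ∀ steps : List Int, aFindStep s1 s2 steps =
      steps.find? (fun s => PySem.List.pyGetD s1 s 0 == PySem.List.pyGetD s2 s 0) := by
  intro steps
  induction steps with
  | nil => rfl
  | cons s rest ih =>
    by_cases h : PySem.List.pyGetD s1 s 0 == PySem.List.pyGetD s2 s 0 <;>
      simp [aFindStep, h, ih]

lemma find?_congr_mem {α : Type} (l : List α) (p q : α → Bool)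
    (h : ∀ x ∈ l, p x = q x) : l.find? p = l.find? q := by
  induction l with
  | nil => rfl
  | cons x rest ih =>
    have hx := h x (by simp)
    by_cases hp : p x = true
    · rw [List.find?_cons_of_pos hp, List.find?_cons_of_pos (by rw [← hx]; exact hp)]
    · rw [List.find?_cons_of_neg hp,
        List.find?_cons_of_neg (by rw [← hx]; exact hp),
        ih (fun y hy => h y (by simp [hy]))]

lemma find_range (kv1 kv2 : Int × List Int) (maxlen : Int)
    (h1 : PySem.List.len kv1.2 ≤ maxlen) (h2 : PySem.List.len kv2.2 ≤ maxlen) :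
    (PySem.List.pyRange 1 maxlen).find? (fun s => collideB s kv1 kv2) =
      aFindStep kv1.2 kv2.2
        (PySem.List.pyRange 1 (min (PySem.List.len kv1.2) (PySem.List.len kv2.2))) := by
  rw [aFindStep_eq]
  by_cases hm1 : min (PySem.List.len kv1.2) (PySem.List.len kv2.2) ≤ 1
  · have hbig : (PySem.List.pyRange 1 maxlen).find? (fun s => collideB s kv1 kv2) = none := by
      apply List.find?_eq_none.mpr
      intro x hx
      have hmem := PySem.List.mem_pyRange_one.mp hx
      simp only [collideB, Bool.and_eq_true, decide_eq_true_eq]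
      rintro ⟨⟨ha, hb⟩, -⟩
      omega
    have hsmall : (PySem.List.pyRange 1
        (min (PySem.List.len kv1.2) (PySem.List.len kv2.2))).find?
        (fun s => PySem.List.pyGetD kv1.2 s 0 == PySem.List.pyGetD kv2.2 s 0) = none := by
      apply List.find?_eq_none.mpr
      intro x hx
      have hmem := PySem.List.mem_pyRange_one.mp hx
      intro _
      omega
    rw [hbig, hsmall]
  · rw [PySem.List.pyRange_one_append 1 (min (PySem.List.len kv1.2) (PySem.List.len kv2.2)) maxlen
        (by omega) (by omega), List.find?_append]
    have htail : (PySem.List.pyRange (min (PySem.List.len kv1.2) (PySem.List.len kv2.2)) maxlen).find?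
        (fun s => collideB s kv1 kv2) = none := by
      apply List.find?_eq_none.mpr
      intro x hx
      have hmem := PySem.List.mem_pyRange_one.mp hx
      simp only [collideB, Bool.and_eq_true, decide_eq_true_eq]
      rintro ⟨⟨ha, hb⟩, -⟩
      omega
    rw [htail, Option.or_none]
    apply find?_congr_mem
    intro x hx
    have hmem := PySem.List.mem_pyRange_one.mp hx
    simp only [PySem.List.len_eq] at hmem
    have hx1 : x < (kv1.2.length : Int) := by omega
    have hx2 : x < (kv2.2.length : Int) := by omega
    simp [collideB, hx1, hx2]

lemma len_le_maxlen (items : List (Int × List Int)) (kv : Int × List Int) (h : kv ∈ items) :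
    PySem.List.len kv.2 ≤ items.foldl (fun m kv => max m (PySem.List.len kv.2)) 0 := by
  have hb := (PySem.List.le_foldl_max (items.map (fun kv => PySem.List.len kv.2)) 0).2
      (PySem.List.len kv.2) (List.mem_map.mpr ⟨kv, h, rfl⟩)
  rw [List.foldl_map] at hb
  exact hb

lemma get_collision_eq (vss : List (Int × List Int))
    (hpre : (vss.map (fun kv => kv.1)).Nodup) :
    get_collision vss = get_collision_alt vss := by
  have hkeys : (PySem.Dict.mk vss : PySem.Dict Int (List Int)).keys = vss.map (fun kv => kv.1) := by
    simp [PySem.Dict.keys]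
  unfold get_collision get_collision_alt
  dsimp only
  rw [PySem.List.foldl_append_singleton_eq_map, List.nil_append, hkeys, ← bPairs_eq]
  congr 1
  apply List.map_congr_left
  intro p hp
  rw [bPairs_eq, pyCombs2_map] at hp
  rcases List.mem_map.mp hp with ⟨⟨kv1, kv2⟩, hmem, rfl⟩
  dsimp only
  have h12 : [kv1, kv2].Sublist vss := sublist_of_mem_pyCombs2 hmem
  have hdn : (PySem.Dict.mk vss : PySem.Dict Int (List Int)).keys.Nodup := by
    rw [hkeys]; exact hpre
  have hi1 : (kv1.1, kv1.2) ∈ (PySem.Dict.mk vss : PySem.Dict Int (List Int)).items := by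
    simpa using h12.subset (show kv1 ∈ [kv1, kv2] by simp)
  have hi2 : (kv2.1, kv2.2) ∈ (PySem.Dict.mk vss : PySem.Dict Int (List Int)).items := by
    simpa using h12.subset (show kv2 ∈ [kv1, kv2] by simp)
  rw [PySem.Dict.getD_of_mem_items _ hi1 hdn, PySem.Dict.getD_of_mem_items _ hi2 hdn]
  rw [foldl_bStep vss hpre kv1 kv2 h12, PySem.Dict.get?_empty, Option.none_or]
  exact (find_range kv1 kv2 _
    (len_le_maxlen vss kv1 (h12.subset (by simp)))
    (len_le_maxlen vss kv2 (h12.subset (by simp)))).symm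

-- ===== VERDICT (by name: the statement is the Claim_ definition above) =====
theorem get_collision_spec : Claim_equal_get_collision := by
  intro vss _ hpre
  unfold Spec_get_collision
  exact get_collision_eq vss hpre
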